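-- pv_equiv track=rewrite | github.com/weswu8/ml | knn.py | knn_prediction
-- ===== SOURCE A (Python) =====
-- import operator as operator
--
-- def knn_prediction(neighbors):
--     classVotes = {}
--     for x in range(len(neighbors)):
--         response = neighbors[x][-1]
--         if response in classVotes:
--             classVotes[response] += 1
--         else:
--             classVotes[response] = 1
--     sortedVotes = sorted(classVotes.items(), key=operator.itemgetter(1), reverse=True)
--
--     # the class with largest voted numbers
--     return sortedVotes[0][0]
-- ===== SOURCE B (Python) =====
-- def knn_prediction(neighbors):
--     responses = [nb[-1] for nb in neighbors]
--     best = responses[0]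
--     for r in responses:
--         if responses.count(r) > responses.count(best):
--             best = r
--     return best
-- ===== Notes on version B (the rewrite author's own statement) =====
-- stated objective: alternative
-- what changed: B drops A's frequency dict and descending stable sort; it extracts the response list once and finds the mode by a repeated-count linear scan, replacing the current best only on a strictly greater count (which preserves A's earliest-class tie-break).
import Mathlib
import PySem

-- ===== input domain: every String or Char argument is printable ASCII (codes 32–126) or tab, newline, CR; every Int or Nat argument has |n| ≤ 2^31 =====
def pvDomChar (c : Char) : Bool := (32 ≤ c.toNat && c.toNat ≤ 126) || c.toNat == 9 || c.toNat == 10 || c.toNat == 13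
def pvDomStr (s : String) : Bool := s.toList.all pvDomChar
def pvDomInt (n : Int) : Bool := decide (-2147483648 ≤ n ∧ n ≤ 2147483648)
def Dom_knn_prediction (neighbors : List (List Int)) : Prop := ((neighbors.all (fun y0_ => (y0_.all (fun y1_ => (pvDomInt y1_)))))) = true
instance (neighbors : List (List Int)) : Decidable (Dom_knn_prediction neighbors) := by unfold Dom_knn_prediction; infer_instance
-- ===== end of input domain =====

-- B replaces A's frequency dict + descending stable sort by a repeated-count scan
-- picking the first class whose vote count is maximal (objective: alternative).

-- ===== PORT A =====
def knn_prediction (neighbors : List (List Int)) : Int :=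
  let classVotes : PySem.Dict Int Int :=
    (PySem.List.pyRange 0 (PySem.List.len neighbors)).foldl
      (fun d x =>
        let response := PySem.List.pyGetD (PySem.List.pyGetD neighbors x []) (-1) 0
        if d.contains response then d.insert response (d.getD response 0 + 1)
        else d.insert response 1)
      PySem.Dict.empty
  let sortedVotes := PySem.List.sorted classVotes.items (fun p => p.2) true
  ((PySem.List.pyGet? sortedVotes 0).getD (0, 0)).1

-- ===== PORT B =====
def knn_prediction_alt (neighbors : List (List Int)) : Int :=
  let responses := neighbors.map (fun nb => PySem.List.pyGetD nb (-1) 0)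
  let best := PySem.List.pyGetD responses 0 0
  responses.foldl (fun best r => if responses.count r > responses.count best then r else best) best

-- ===== PRECONDITION & SPEC =====
-- A raises IndexError on empty `neighbors` (sortedVotes[0]) and on any empty neighbor row (nb[-1]); Pre_ excludes exactly those.
def Pre_knn_prediction (neighbors : List (List Int)) : Prop :=
  neighbors ≠ [] ∧ ∀ nb ∈ neighbors, nb ≠ []
instance (neighbors : List (List Int)) : Decidable (Pre_knn_prediction neighbors) := by unfold Pre_knn_prediction; infer_instance
def pvWitness_knn_prediction : List (List Int) := [[1, 2], [0, 3], [5, 2]]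

def Spec_knn_prediction (neighbors : List (List Int)) (out : Int) : Prop := out = knn_prediction_alt neighbors
instance (neighbors : List (List Int)) (out : Int) : Decidable (Spec_knn_prediction neighbors out) := by unfold Spec_knn_prediction; infer_instance

-- ===== CLAIM (what is proved, stated in full; the proofs are below) =====
def Claim_equal_knn_prediction : Prop := ∀ (neighbors : List (List Int)), Dom_knn_prediction neighbors → Pre_knn_prediction neighbors → Spec_knn_prediction neighbors (knn_prediction neighbors)

-- ===== LEMMAS AND PROOFS =====

-- the argmax step both programs boil down to; c is the fixed per-class count
def pvStep (c : Int → Nat) (b r : Int) : Int := if c b < c r then r else b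

-- the fold accumulates a value whose count dominates the start and everything seen
theorem pvStep_fold_max (c : Int → Nat) :
    ∀ (l : List Int) (b : Int),
      c b ≤ c (l.foldl (pvStep c) b) ∧ ∀ y ∈ l, c y ≤ c (l.foldl (pvStep c) b) := by
  intro l
  induction l with
  | nil => intro b; exact ⟨le_rfl, by simp⟩
  | cons x t ih =>
    intro b
    simp only [List.foldl_cons]
    have h := ih (pvStep c b x)
    have hbs : c b ≤ c (pvStep c b x) := by unfold pvStep; split <;> omega
    have hxs : c x ≤ c (pvStep c b x) := by unfold pvStep; split <;> omega
    refine ⟨le_trans hbs h.1, ?_⟩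
    intro y hy
    rcases List.mem_cons.mp hy with rfl | hy'
    · exact le_trans hxs h.1
    · exact h.2 y hy'

theorem pvStep_self (c : Int → Nat) (b : Int) : pvStep c b b = b := by
  unfold pvStep; simp

-- duplicates never win a strict comparison: folding over the list and over its
-- ordered dedup (first occurrences) from the same start agree
theorem pvStep_fold_ofList (c : Int → Nat) :
    ∀ (l : List Int) (b : Int),
      (PySem.Set.ofList (b :: l)).foldl (pvStep c) b = (b :: l).foldl (pvStep c) b := by
  intro l
  induction l using List.reverseRecOn with
  | nil => intro b; rfl
  | append_singleton t x ih =>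
    intro b
    have hsplit : b :: (t ++ [x]) = (b :: t) ++ [x] := by simp
    rw [hsplit, PySem.Set.ofList_append_singleton, List.foldl_append]
    cases hxc : (PySem.Set.ofList (b :: t)).contains x with
    | true =>
      have hadd : (PySem.Set.ofList (b :: t)).add x = PySem.Set.ofList (b :: t) := by
        unfold PySem.Set.add; rw [hxc]; simp
      have hmem : x ∈ b :: t := by
        refine (PySem.Set.mem_ofList _ _).mp ?_
        have h := hxc
        unfold PySem.Set.contains at h
        simpa using h
      have hmax := pvStep_fold_max c t b
      have hxle : c x ≤ c (t.foldl (pvStep c) b) := by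
        rcases List.mem_cons.mp hmem with rfl | hx'
        · exact hmax.1
        · exact hmax.2 x hx'
      rw [hadd, ih b]
      simp only [List.foldl_cons, List.foldl_nil, pvStep_self]
      have hnlt : ¬ c (List.foldl (pvStep c) b t) < c x := by omega
      exact (show pvStep c (List.foldl (pvStep c) b t) x = List.foldl (pvStep c) b t
        from if_neg hnlt).symm
    | false =>
      have hadd : (PySem.Set.ofList (b :: t)).add x = PySem.Set.ofList (b :: t) ++ [x] := by
        unfold PySem.Set.add; rw [hxc]; simp
      rw [hadd, List.foldl_append, ih b]

-- head of A's descending stable insertion sort, tracked through the foldl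
theorem pvHead_insertSort (key : Int × Int → Int) :
    ∀ (l : List (Int × Int)) (h : Int × Int) (t : List (Int × Int)),
      ∃ t', l.foldl (fun acc x => PySem.List.insertBy (fun a b => decide (key b < key a)) x acc) (h :: t)
            = (l.foldl (fun b x => if key b < key x then x else b) h) :: t' := by
  intro l
  induction l with
  | nil => intro h t; exact ⟨t, rfl⟩
  | cons x l ih =>
    intro h t
    simp only [List.foldl_cons]
    by_cases hk : key h < key x
    · have hi : PySem.List.insertBy (fun a b => decide (key b < key a)) x (h :: t) = x :: h :: t := by
        simp [PySem.List.insertBy, hk]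
      rw [hi, if_pos hk]
      exact ih x (h :: t)
    · have hi : PySem.List.insertBy (fun a b => decide (key b < key a)) x (h :: t)
           = h :: PySem.List.insertBy (fun a b => decide (key b < key a)) x t := by
        simp [PySem.List.insertBy, hk]
      rw [hi, if_neg hk]
      exact ih h _

-- starting the insertion-sort fold from the empty accumulator
theorem pvHead_insertSort0 (key : Int × Int → Int) (h : Int × Int) (l : List (Int × Int)) :
    ∃ t', (h :: l).foldl (fun acc x => PySem.List.insertBy (fun a b => decide (key b < key a)) x acc) []
          = (l.foldl (fun b x => if key b < key x then x else b) h) :: t' := by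
  simp only [List.foldl_cons]
  exact pvHead_insertSort key l h []

-- folding the pair step over the (class, count) pairs is folding pvStep over the classes
theorem pvFold_pairs (c : Int → Nat) :
    ∀ (l : List Int) (b : Int),
      (l.map (fun k => (k, (c k : Int)))).foldl
          (fun p q => if p.2 < q.2 then q else p) (b, (c b : Int))
        = (l.foldl (pvStep c) b, (c (l.foldl (pvStep c) b) : Int)) := by
  intro l
  induction l with
  | nil => intro b; rfl
  | cons x t ih =>
    intro b
    simp only [List.map_cons, List.foldl_cons]
    have hstep : (if ((b, (c b : Int)) : Int × Int).2 < ((x, (c x : Int)) : Int × Int).2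
        then ((x, (c x : Int)) : Int × Int) else (b, (c b : Int)))
        = (pvStep c b x, (c (pvStep c b x) : Int)) := by
      unfold pvStep
      by_cases h : c b < c x
      · simp [h]
      · simp [h]
    rw [hstep, ih]

-- A's vote-dict loop is the Counter pattern
theorem pvDict_eq_counter (rs : List Int) :
    rs.foldl (fun d r =>
        if d.contains r then d.insert r (d.getD r 0 + 1) else d.insert r 1)
      PySem.Dict.empty = PySem.Dict.counter rs := by
  rw [← PySem.Dict.foldl_insert_getD_add_one_eq_counter]
  apply PySem.List.foldl_congr_mem
  intro d r _hr
  by_cases h : d.contains r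
  · rw [if_pos h]
  · have hfalse : d.contains r = false := by simpa using h
    rw [if_neg h, PySem.Dict.getD_of_not_contains (h := hfalse)]
    norm_num

theorem pvGet_zero_cons {α : Type} (x : α) (t : List α) (d : α) :
    (PySem.List.pyGet? (x :: t) 0).getD d = x := by
  norm_num [PySem.List.pyGet?, PySem.List.pyIdx?]

theorem pvGetD_zero_cons {α : Type} (x : α) (t : List α) (d : α) :
    PySem.List.pyGetD (x :: t) 0 d = x := by
  norm_num [PySem.List.pyGetD, PySem.List.pyGet?, PySem.List.pyIdx?]

-- the whole tail of A (head of the descending sort of the counter items)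
-- equals B's repeated-count scan
theorem pvTail (rs : List Int) (r0 : Int) (rt : List Int) (h : rs = r0 :: rt) :
    ((PySem.List.pyGet?
        (PySem.List.sorted ((PySem.Set.ofList rs).map (fun k => (k, (List.count k rs : Int))))
          (fun p => p.2) true) 0).getD (0, 0)).1
    = rs.foldl (fun best r => if List.count r rs > List.count best rs then r else best)
        (PySem.List.pyGetD rs 0 0) := by
  subst h
  rw [PySem.List.sorted_rev_eq_foldl_insertBy]
  obtain ⟨ks, hofl⟩ : ∃ ks, PySem.Set.ofList (r0 :: rt) = r0 :: ks :=
    ⟨_, PySem.Set.ofList_cons _ _⟩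
  rw [hofl]
  simp only [List.map_cons]
  obtain ⟨t', ht'⟩ := pvHead_insertSort0 (fun p => p.2)
    (r0, (List.count r0 (r0 :: rt) : Int))
    (ks.map (fun k => (k, (List.count k (r0 :: rt) : Int))))
  rw [ht', pvGet_zero_cons, pvGetD_zero_cons]
  have hp := pvFold_pairs (fun v => List.count v (r0 :: rt)) ks r0
  beta_reduce at hp ⊢
  rw [hp]
  have hstepeq : (fun (best r : Int) =>
        if List.count r (r0 :: rt) > List.count best (r0 :: rt) then r else best)
      = pvStep (fun v => List.count v (r0 :: rt)) := by
    funext b r; unfold pvStep; simp [gt_iff_lt]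
  rw [hstepeq]
  have hded := pvStep_fold_ofList (fun v => List.count v (r0 :: rt)) rt r0
  rw [hofl] at hded
  simp only [List.foldl_cons, pvStep_self] at hded ⊢
  exact hded

-- ===== VERDICT (by name: the statement is the Claim_ definition above) =====
theorem knn_prediction_spec : Claim_equal_knn_prediction := by
  intro neighbors _hdom hpre
  obtain ⟨hne, _hrows⟩ := hpre
  obtain ⟨n0, nt, rfl⟩ : ∃ a l, neighbors = a :: l := by
    cases neighbors with
    | nil => exact absurd rfl hne
    | cons a l => exact ⟨a, l, rfl⟩
  unfold Spec_knn_prediction knn_prediction knn_prediction_alt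
  dsimp only
  have hloop :
      (PySem.List.pyRange 0 (PySem.List.len (n0 :: nt))).foldl
        (fun d x =>
          if d.contains (PySem.List.pyGetD (PySem.List.pyGetD (n0 :: nt) x []) (-1) 0) then
            d.insert (PySem.List.pyGetD (PySem.List.pyGetD (n0 :: nt) x []) (-1) 0)
              (d.getD (PySem.List.pyGetD (PySem.List.pyGetD (n0 :: nt) x []) (-1) 0) 0 + 1)
          else d.insert (PySem.List.pyGetD (PySem.List.pyGetD (n0 :: nt) x []) (-1) 0) 1)
        PySem.Dict.empty
      = PySem.Dict.counter ((n0 :: nt).map (fun nb => PySem.List.pyGetD nb (-1) 0)) := by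
    have h1 := PySem.List.foldl_pyRange_zero_pyGetD (n0 :: nt) ([] : List Int)
      (fun (d : PySem.Dict Int Int) nb =>
        if d.contains (PySem.List.pyGetD nb (-1) 0) then
          d.insert (PySem.List.pyGetD nb (-1) 0) (d.getD (PySem.List.pyGetD nb (-1) 0) 0 + 1)
        else d.insert (PySem.List.pyGetD nb (-1) 0) 1)
      PySem.Dict.empty
    have h2 : (n0 :: nt).foldl
        (fun (d : PySem.Dict Int Int) nb =>
          if d.contains (PySem.List.pyGetD nb (-1) 0) then
            d.insert (PySem.List.pyGetD nb (-1) 0) (d.getD (PySem.List.pyGetD nb (-1) 0) 0 + 1)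
          else d.insert (PySem.List.pyGetD nb (-1) 0) 1)
        PySem.Dict.empty
        = ((n0 :: nt).map (fun nb => PySem.List.pyGetD nb (-1) 0)).foldl
            (fun (d : PySem.Dict Int Int) r =>
              if d.contains r then d.insert r (d.getD r 0 + 1) else d.insert r 1)
            PySem.Dict.empty := by
      rw [List.foldl_map]
    exact h1.trans (h2.trans (pvDict_eq_counter _))
  rw [hloop, PySem.Dict.items_counter]
  exact pvTail ((n0 :: nt).map (fun nb => PySem.List.pyGetD nb (-1) 0))
    (PySem.List.pyGetD n0 (-1) 0) (nt.map (fun nb => PySem.List.pyGetD nb (-1) 0))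
    (by simp)
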